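-- pv_equiv track=rewrite | github.com/maxukreg/BridgeViewer | Dashboard/Scripts/CSVtoLin.py | organize_bids_in_rotation
-- ===== SOURCE A (Python) =====
-- def organize_bids_in_rotation(biddingdatadict, dealerposchar):
--     organizedbids = []
--     player_order = ["North", "East", "South", "West"]
--     dealer_fullname = {"N": "North", "E": "East", "S": "South", "W": "West"}[
--         dealerposchar.upper()
--     ]
--
--     start_idx = player_order.index(dealer_fullname)
--     rotation = player_order[start_idx:] + player_order[:start_idx]
--
--     # Create pointers for each player's bid list
--     bid_indices = {player: 0 for player in player_order}
--
--     # Interleave bids in rotation order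
--     while True:
--         added_any = False
--         for player in rotation:
--             playerbids = biddingdatadict.get(player, [])
--             if bid_indices[player] < len(playerbids):
--                 organizedbids.append(playerbids[bid_indices[player]])
--                 bid_indices[player] += 1
--                 added_any = True
--
--         if not added_any:
--             break
--
--     return organizedbids
-- ===== SOURCE B (Python) =====
-- def organize_bids_in_rotation(biddingdatadict, dealerposchar):
--     player_order = ["North", "East", "South", "West"]
--     dealer_fullname = {"N": "North", "E": "East", "S": "South", "W": "West"}[
--         dealerposchar.upper()
--     ]
--     start_idx = player_order.index(dealer_fullname)
--
--     # Decorate-sort-undecorate: give the r-th bid of the player seated at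
--     # rotation offset p the timestamp 4*r + p, then sort by timestamp.
--     tagged = []
--     for seat, player in enumerate(player_order):
--         pos = (seat - start_idx) % 4
--         for rnd, bid in enumerate(biddingdatadict.get(player, [])):
--             tagged.append((4 * rnd + pos, bid))
--     tagged.sort(key=lambda t: t[0])
--     return [bid for _, bid in tagged]
-- ===== Notes on version B (the rewrite author's own statement) =====
-- stated objective: alternative
-- what changed: Replaces A's while-True interleaving loop with per-player pointers and an added_any flag by decorate-sort-undecorate: each bid gets an integer timestamp 4*round + rotation_offset, the tagged list is sorted by timestamp and the bids extracted.
import Mathlib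
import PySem

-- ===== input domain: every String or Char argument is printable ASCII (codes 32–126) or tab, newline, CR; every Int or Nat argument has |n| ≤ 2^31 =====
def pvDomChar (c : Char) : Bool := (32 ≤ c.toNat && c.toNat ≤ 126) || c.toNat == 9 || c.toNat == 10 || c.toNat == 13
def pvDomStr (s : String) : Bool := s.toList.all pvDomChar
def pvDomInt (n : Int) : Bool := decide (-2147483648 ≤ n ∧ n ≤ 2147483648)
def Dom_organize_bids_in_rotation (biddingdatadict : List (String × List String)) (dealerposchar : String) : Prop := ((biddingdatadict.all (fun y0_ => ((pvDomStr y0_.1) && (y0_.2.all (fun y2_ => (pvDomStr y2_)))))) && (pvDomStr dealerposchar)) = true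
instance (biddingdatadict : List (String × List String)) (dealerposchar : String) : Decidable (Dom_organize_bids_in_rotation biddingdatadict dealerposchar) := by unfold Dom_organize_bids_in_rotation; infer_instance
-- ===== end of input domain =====

-- B replaces A's while-True interleaving loop (per-player pointers, added_any flag) by
-- decorate-sort-undecorate: each bid is tagged with the timestamp 4*round + rotation
-- offset of its player, the tags are sorted and the bids extracted (objective: alternative).

-- ===== PORT A =====
-- one body of A's `while True:` loop: `for player in rotation: …` over the state
-- (organizedbids, bid_indices, added_any); `playerbids[bid_indices[player]]` is in range
-- whenever the branch is taken, so `.getD ""` / `.getD player 0` are pure totality guards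
def pvPassA (bdd : PySem.Dict String (List String)) (rotation : List String)
    (st : List String × PySem.Dict String Int × Bool) :
    List String × PySem.Dict String Int × Bool :=
  rotation.foldl (fun st player =>
    let playerbids := bdd.getD player []
    let idx := st.2.1.getD player 0
    if idx < (playerbids.length : Int) then
      (st.1 ++ [(PySem.List.pyGet? playerbids idx).getD ""],
       st.2.1.insert player (idx + 1), true)
    else st) st

-- A's `while True: … if not added_any: break`; the fuel (total number of bids + 1 at the
-- call site) is a totality guard only — the proof shows it is never exhausted
def pvLoopA (bdd : PySem.Dict String (List String)) (rotation : List String) :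
    Nat → List String → PySem.Dict String Int → List String
  | 0, organizedbids, _ => organizedbids
  | fuel + 1, organizedbids, bid_indices =>
    let st := pvPassA bdd rotation (organizedbids, bid_indices, false)
    if st.2.2 then pvLoopA bdd rotation fuel st.1 st.2.1 else st.1

def organize_bids_in_rotation (biddingdatadict : List (String × List String)) (dealerposchar : String) : List String :=
  let player_order : List String := ["North", "East", "South", "West"]
  -- {"N": …}[dealerposchar.upper()]: `none` = Python's KeyError, excluded by Pre_
  match PySem.Dict.get? (PySem.Dict.mk [("N", "North"), ("E", "East"), ("S", "South"), ("W", "West")]) (PySem.Str.upper dealerposchar) with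
  | none => []
  | some dealer_fullname =>
    -- player_order.index(dealer_fullname) always succeeds (fullname ∈ player_order): `.getD 0` is a totality guard
    let start_idx := (PySem.List.index? player_order dealer_fullname).getD 0
    -- player_order[start_idx:] + player_order[:start_idx] with 0 ≤ start_idx < 4 (PySem.List.slice_from_natCast / slice_to_natCast)
    let rotation := player_order.drop start_idx ++ player_order.take start_idx
    let bdict := PySem.Dict.mk biddingdatadict
    let bid_indices := PySem.Dict.mk (player_order.map (fun p => (p, (0 : Int))))
    pvLoopA bdict rotation ((rotation.map (fun p => (bdict.getD p []).length)).sum + 1) [] bid_indices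

-- ===== PORT B =====
def organize_bids_in_rotation_alt (biddingdatadict : List (String × List String)) (dealerposchar : String) : List String :=
  let player_order : List String := ["North", "East", "South", "West"]
  match PySem.Dict.get? (PySem.Dict.mk [("N", "North"), ("E", "East"), ("S", "South"), ("W", "West")]) (PySem.Str.upper dealerposchar) with
  | none => []
  | some dealer_fullname =>
    let start_idx := (PySem.List.index? player_order dealer_fullname).getD 0
    -- for seat, player in enumerate(player_order): … tagged.append((4*rnd + pos, bid))
    let tagged := (PySem.List.enumerate player_order 0).foldl (fun acc sp =>
      let pos := PySem.Int.mod (sp.1 - (start_idx : Int)) 4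
      (PySem.List.enumerate (PySem.Dict.getD (PySem.Dict.mk biddingdatadict) sp.2 []) 0).foldl
        (fun acc2 rb => acc2 ++ [(4 * rb.1 + pos, rb.2)]) acc) ([] : List (Int × String))
    -- tagged.sort(key=lambda t: t[0]); [bid for _, bid in tagged]
    (PySem.List.sorted tagged (fun t => t.1) false).map (fun t => t.2)

-- ===== PRECONDITION & SPEC =====
-- Pre_ excludes exactly the dealer strings whose .upper() is not a key of the position
-- dict, where Python A raises KeyError.
def Pre_organize_bids_in_rotation (biddingdatadict : List (String × List String)) (dealerposchar : String) : Prop :=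
  PySem.Str.upper dealerposchar ∈ (["N", "E", "S", "W"] : List String)
instance (biddingdatadict : List (String × List String)) (dealerposchar : String) : Decidable (Pre_organize_bids_in_rotation biddingdatadict dealerposchar) := by unfold Pre_organize_bids_in_rotation; infer_instance

def pvWitness_organize_bids_in_rotation : (List (String × List String)) × String :=
  ([("North", ["1C", "2C"]), ("East", ["1D"]), ("South", ["1H"])], "e")

def Spec_organize_bids_in_rotation (biddingdatadict : List (String × List String)) (dealerposchar : String) (out : List String) : Prop := out = organize_bids_in_rotation_alt biddingdatadict dealerposchar
instance (biddingdatadict : List (String × List String)) (dealerposchar : String) (out : List String) : Decidable (Spec_organize_bids_in_rotation biddingdatadict dealerposchar out) := by unfold Spec_organize_bids_in_rotation; infer_instance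

-- ===== CLAIM (what is proved, stated in full; the proofs are below) =====
def Claim_equal_organize_bids_in_rotation : Prop := ∀ (biddingdatadict : List (String × List String)) (dealerposchar : String), Dom_organize_bids_in_rotation biddingdatadict dealerposchar → Pre_organize_bids_in_rotation biddingdatadict dealerposchar → Spec_organize_bids_in_rotation biddingdatadict dealerposchar (organize_bids_in_rotation biddingdatadict dealerposchar)

-- ===== LEMMAS AND PROOFS =====

-- the bids emitted in round r, in rotation order; all bids from round r on
def pvRoundOf (lists : List (List String)) (r : Nat) : List String :=
  (lists.filter (fun l => decide (r < l.length))).map (fun l => l[r]?.getD "")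

def pvMaxLen (lists : List (List String)) : Nat := (lists.map List.length).foldl max 0

def pvTail (lists : List (List String)) (r : Nat) : List String :=
  (List.range' r (pvMaxLen lists - r)).flatMap (pvRoundOf lists)

-- ===== A side =====
theorem pvPassA_spec (bdict : PySem.Dict String (List String)) (rotation : List String)
    (hnd : rotation.Nodup) (r : Nat) (acc : List String) (d : PySem.Dict String Int) (flag : Bool)
    (hd : ∀ p ∈ rotation, d.getD p 0 = (min r (bdict.getD p []).length : Int)) :
    ∃ d', pvPassA bdict rotation (acc, d, flag) =
        (acc ++ pvRoundOf (rotation.map (fun p => bdict.getD p [])) r, d',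
         flag || rotation.any (fun p => decide (r < (bdict.getD p []).length)))
      ∧ (∀ p ∈ rotation, d'.getD p 0 = (min (r + 1) (bdict.getD p []).length : Int))
      ∧ (∀ q, q ∉ rotation → d'.getD q 0 = d.getD q 0) := by
  induction rotation generalizing acc d flag with
  | nil => exact ⟨d, by simp [pvPassA, pvRoundOf], by simp, fun q _ => rfl⟩
  | cons p t ih =>
    have hnd' := hnd
    rw [List.nodup_cons] at hnd'
    obtain ⟨hpt, hndt⟩ := hnd'
    have hdp := hd p (by simp)
    by_cases hlt : r < (bdict.getD p []).length
    · -- branch taken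
      have hidx : d.getD p 0 < ((bdict.getD p []).length : Int) := by
        rw [hdp]; omega
      have hmin : min (r : Int) ((bdict.getD p []).length : Int) = (r : Int) := by omega
      have hstep : pvPassA bdict (p :: t) (acc, d, flag) =
          pvPassA bdict t (acc ++ [(PySem.List.pyGet? (bdict.getD p []) (d.getD p 0)).getD ""],
            d.insert p (d.getD p 0 + 1), true) := by
        simp [pvPassA, hidx]
      have hd' : ∀ q ∈ t, (d.insert p (d.getD p 0 + 1)).getD q 0 = (min r (bdict.getD q []).length : Int) := by
        intro q hq
        rw [PySem.Dict.getD_insert_of_ne _ _ _ (by rintro rfl; exact hpt hq)]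
        exact hd q (by simp [hq])
      obtain ⟨d', heq, hinv, hout⟩ := ih hndt _ _ true hd'
      refine ⟨d', ?_, ?_, ?_⟩
      · rw [hstep, heq]
        have helem : (PySem.List.pyGet? (bdict.getD p []) (d.getD p 0)).getD "" = (bdict.getD p [])[r]?.getD "" := by
          rw [hdp, hmin, PySem.List.pyGet?_natCast]
        simp [pvRoundOf, hlt, helem]
      · intro q hq
        rcases List.mem_cons.mp hq with rfl | hq'
        · rw [hout q hpt, hdp, hmin, PySem.Dict.getD_insert_self]
          omega
        · exact hinv q hq'
      · intro q hq
        have h1 : q ∉ t := fun h => hq (by simp [h])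
        have h2 : q ≠ p := fun h => hq (by simp [h])
        rw [hout q h1, PySem.Dict.getD_insert_of_ne _ _ _ h2]
    · -- branch not taken
      have hidx : ¬ d.getD p 0 < ((bdict.getD p []).length : Int) := by
        rw [hdp]; omega
      have hstep : pvPassA bdict (p :: t) (acc, d, flag) = pvPassA bdict t (acc, d, flag) := by
        simp [pvPassA, hidx]
      obtain ⟨d', heq, hinv, hout⟩ := ih hndt acc d flag (fun q hq => hd q (by simp [hq]))
      refine ⟨d', ?_, ?_, ?_⟩
      · rw [hstep, heq]
        simp [pvRoundOf, hlt]
      · intro q hq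
        rcases List.mem_cons.mp hq with rfl | hq'
        · rw [hout q hpt, hdp]
          omega
        · exact hinv q hq'
      · intro q hq
        exact hout q (fun h => hq (by simp [h]))

theorem pvFoldlMax_le_iff (xs : List Nat) (a r : Nat) : xs.foldl max a ≤ r ↔ a ≤ r ∧ ∀ x ∈ xs, x ≤ r := by
  induction xs generalizing a with
  | nil => simp
  | cons x t ih => simp [ih]; tauto

theorem pvMaxLen_le_iff (lists : List (List String)) (r : Nat) :
    pvMaxLen lists ≤ r ↔ ∀ l ∈ lists, l.length ≤ r := by
  simp [pvMaxLen, pvFoldlMax_le_iff]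

theorem pvTail_stop (lists : List (List String)) (r : Nat) (h : pvMaxLen lists ≤ r) :
    pvTail lists r = [] := by
  simp [pvTail, Nat.sub_eq_zero_of_le h]

theorem pvTail_step (lists : List (List String)) (r : Nat) (h : r < pvMaxLen lists) :
    pvTail lists r = pvRoundOf lists r ++ pvTail lists (r + 1) := by
  have h2 : pvMaxLen lists - r = (pvMaxLen lists - (r + 1)) + 1 := by omega
  simp [pvTail, h2, List.range'_succ]

theorem pvLoopA_spec (bdict : PySem.Dict String (List String)) (rotation : List String)
    (hnd : rotation.Nodup) :
    ∀ (fuel r : Nat) (acc : List String) (d : PySem.Dict String Int),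
      pvMaxLen (rotation.map (fun p => bdict.getD p [])) - r < fuel →
      (∀ p ∈ rotation, d.getD p 0 = (min r (bdict.getD p []).length : Int)) →
      pvLoopA bdict rotation fuel acc d =
        acc ++ pvTail (rotation.map (fun p => bdict.getD p [])) r := by
  intro fuel
  induction fuel with
  | zero => intro r acc d hf; omega
  | succ fuel ih =>
    intro r acc d hf hd
    obtain ⟨d', heq, hinv, -⟩ := pvPassA_spec bdict rotation hnd r acc d false hd
    by_cases hany : rotation.any (fun p => decide (r < (bdict.getD p []).length)) = true
    · have hr : r < pvMaxLen (rotation.map (fun p => bdict.getD p [])) := by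
        by_contra hc
        rw [not_lt, pvMaxLen_le_iff] at hc
        simp only [List.any_eq_true, decide_eq_true_eq] at hany
        obtain ⟨p, hp, hlt⟩ := hany
        exact absurd (hc _ (List.mem_map_of_mem hp)) (by omega)
      rw [pvLoopA, heq]
      simp only [hany, Bool.false_or, if_true]
      rw [ih (r + 1) _ d' (by omega) hinv, pvTail_step _ _ hr, List.append_assoc]
    · have hall : pvMaxLen (rotation.map (fun p => bdict.getD p [])) ≤ r := by
        rw [pvMaxLen_le_iff]
        simp only [List.any_eq_true, decide_eq_true_eq, not_exists, not_and] at hany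
        intro l hl
        obtain ⟨p, hp, rfl⟩ := List.mem_map.mp hl
        have := hany p hp
        omega
      rw [pvLoopA, heq]
      have hround : pvRoundOf (rotation.map (fun p => bdict.getD p [])) r = [] := by
        simp only [pvRoundOf, List.map_eq_nil_iff, List.filter_eq_nil_iff, decide_eq_true_eq]
        intro l hl
        have := (pvMaxLen_le_iff _ r).mp hall l hl
        omega
      simp only [Bool.false_or]
      rw [if_neg (by simpa using hany)]
      simp [hround, pvTail_stop _ _ hall]

theorem pvMaxLen_le_sum (lists : List (List String)) :
    pvMaxLen lists ≤ (lists.map List.length).sum := by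
  rw [pvMaxLen, pvFoldlMax_le_iff]
  exact ⟨Nat.zero_le _, fun x hx => List.le_sum_of_mem hx⟩

theorem pvA_eq_tail (bdd : List (String × List String)) (rotation : List String)
    (hnd : rotation.Nodup)
    (hd0 : ∀ p ∈ rotation,
      (PySem.Dict.mk ((["North", "East", "South", "West"] : List String).map (fun p => (p, (0 : Int))))).getD p 0 = 0) :
    pvLoopA (PySem.Dict.mk bdd) rotation
        ((rotation.map (fun p => ((PySem.Dict.mk bdd).getD p []).length)).sum + 1) []
        (PySem.Dict.mk ((["North", "East", "South", "West"] : List String).map (fun p => (p, (0 : Int))))) =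
      pvTail (rotation.map (fun p => (PySem.Dict.mk bdd).getD p [])) 0 := by
  have hfuel : pvMaxLen (rotation.map (fun p => (PySem.Dict.mk bdd).getD p [])) - 0 <
      (rotation.map (fun p => ((PySem.Dict.mk bdd).getD p []).length)).sum + 1 := by
    have := pvMaxLen_le_sum (rotation.map (fun p => (PySem.Dict.mk bdd).getD p []))
    rw [List.map_map] at this
    simp only [Function.comp_def] at this
    omega
  have := pvLoopA_spec (PySem.Dict.mk bdd) rotation hnd _ 0 []
    (PySem.Dict.mk ((["North", "East", "South", "West"] : List String).map (fun p => (p, (0 : Int)))))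
    hfuel (fun p hp => by rw [hd0 p hp]; simp)
  rw [this, List.nil_append]

-- ===== B side =====
-- one player's tagged segment: the r-th bid of the player at rotation offset p gets key 4r+p
def pvSeg (l : List String) (p : Int) : List (Int × String) :=
  (PySem.List.enumerate l 0).map (fun rb => (4 * rb.1 + p, rb.2))

-- the tagged pairs of round r, columns j, j+1, … of `ls`
def pvDec : List (List String) → Nat → Nat → List (Int × String)
  | [], _, _ => []
  | l :: ls, j, r =>
    (if r < l.length then [(((4 * r + j : Nat) : Int), l[r]?.getD "")] else []) ++ pvDec ls (j + 1) r

def pvYs (lists : List (List String)) : List (Int × String) :=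
  (List.range (pvMaxLen lists)).flatMap (fun r => pvDec lists 0 r)

theorem pvMem_pvDec (ls : List (List String)) (j r : Nat) (x : Int × String) :
    x ∈ pvDec ls j r ↔ ∃ (k : Nat) (hk : k < ls.length), r < ls[k].length ∧
      x = ((((4 * r + j + k : Nat)) : Int), ls[k][r]?.getD "") := by
  induction ls generalizing j with
  | nil => simp [pvDec]
  | cons l ls ih =>
    rw [pvDec, List.mem_append]
    constructor
    · intro hx
      rcases hx with hx | hx
      · by_cases h : r < l.length
        · simp only [h, if_true, List.mem_singleton] at hx
          exact ⟨0, by simp, by simpa using h, by simpa using hx⟩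
        · simp [h] at hx
      · obtain ⟨k, hk, hr, hx⟩ := (ih (j + 1)).mp hx
        refine ⟨k + 1, by simpa using hk, by simpa using hr, ?_⟩
        rw [hx]
        have : 4 * r + (j + 1) + k = 4 * r + j + (k + 1) := by omega
        simp [this]
    · rintro ⟨k, hk, hr, rfl⟩
      cases k with
      | zero =>
        left
        simp only [List.getElem_cons_zero] at hr
        simp [hr]
      | succ k =>
        right
        refine (ih (j + 1)).mpr ⟨k, by simpa using hk, by simpa using hr, ?_⟩
        have : 4 * r + (j + 1) + k = 4 * r + j + (k + 1) := by omega
        simp [this]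

theorem pvMap_snd_pvDec (ls : List (List String)) (j r : Nat) :
    (pvDec ls j r).map (fun t => t.2) = pvRoundOf ls r := by
  induction ls generalizing j with
  | nil => simp [pvDec, pvRoundOf]
  | cons l ls ih =>
    rw [pvDec, List.map_append, ih]
    by_cases h : r < l.length <;> simp [pvRoundOf, h]

theorem pvPairwise_pvDec (ls : List (List String)) (j r : Nat) :
    (pvDec ls j r).Pairwise (fun a b => a.1 < b.1) := by
  induction ls generalizing j with
  | nil => simp [pvDec]
  | cons l ls ih =>
    rw [pvDec, List.pairwise_append]
    refine ⟨by split_ifs <;> simp, ih (j + 1), ?_⟩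
    intro a ha b hb
    obtain ⟨k, hk, hr, rfl⟩ := (pvMem_pvDec _ _ _ _).mp hb
    have ha' : a.1 = ((4 * r + j : Nat) : Int) := by
      split_ifs at ha with h
      · simp only [List.mem_singleton] at ha; rw [ha]
      · simp at ha
    rw [ha']
    push_cast
    omega

theorem pvPairwise_pvYs (lists : List (List String)) (h4 : lists.length ≤ 4) :
    (pvYs lists).Pairwise (fun a b => a.1 < b.1) := by
  rw [pvYs, List.pairwise_flatMap]
  refine ⟨fun r _ => pvPairwise_pvDec lists 0 r, ?_⟩
  have := List.pairwise_lt_range (n := pvMaxLen lists)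
  refine this.imp ?_
  intro r1 r2 h12 x hx y hy
  obtain ⟨k1, hk1, _, rfl⟩ := (pvMem_pvDec _ _ _ _).mp hx
  obtain ⟨k2, hk2, _, rfl⟩ := (pvMem_pvDec _ _ _ _).mp hy
  push_cast
  omega

theorem pvMem_pvSeg (l : List String) (p : Int) (x : Int × String) :
    x ∈ pvSeg l p ↔ ∃ (k : Nat) (hk : k < l.length), x = ((4 * k + p : Int), l[k]) := by
  simp only [pvSeg, List.mem_map, PySem.List.mem_enumerate_iff]
  constructor
  · rintro ⟨q, ⟨k, hk, rfl⟩, rfl⟩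
    exact ⟨k, hk, by simp⟩
  · rintro ⟨k, hk, rfl⟩
    exact ⟨((k : Int), l[k]), ⟨k, hk, by simp⟩, by simp⟩

theorem pvMem_pvYs (la lb lc ld : List String) (x : Int × String) :
    x ∈ pvYs [la, lb, lc, ld] ↔ x ∈ pvSeg la 0 ++ pvSeg lb 1 ++ pvSeg lc 2 ++ pvSeg ld 3 := by
  have hmax : ∀ l ∈ ([la, lb, lc, ld] : List (List String)), ∀ r : Nat, r < l.length →
      r < pvMaxLen [la, lb, lc, ld] := by
    intro l hl r hr
    by_contra hc
    exact absurd ((pvMaxLen_le_iff [la, lb, lc, ld] r).mp (by omega) l hl) (by omega)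
  rw [pvYs]
  simp only [List.mem_append, List.mem_flatMap, List.mem_range, pvMem_pvDec, pvMem_pvSeg]
  constructor
  · rintro ⟨r, hr, k, hk, hrl, rfl⟩
    simp only [List.length_cons, List.length_nil] at hk
    interval_cases k <;>
      simp only [List.getElem_cons_zero, List.getElem_cons_succ] at hrl ⊢
    · exact Or.inl (Or.inl (Or.inl ⟨r, hrl, by rw [List.getElem?_eq_getElem hrl]; push_cast; simp⟩))
    · exact Or.inl (Or.inl (Or.inr ⟨r, hrl, by rw [List.getElem?_eq_getElem hrl]; push_cast; simp⟩))
    · exact Or.inl (Or.inr ⟨r, hrl, by rw [List.getElem?_eq_getElem hrl]; push_cast; simp⟩)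
    · exact Or.inr ⟨r, hrl, by rw [List.getElem?_eq_getElem hrl]; push_cast; simp⟩
  · rintro (((⟨k, hk, rfl⟩ | ⟨k, hk, rfl⟩) | ⟨k, hk, rfl⟩) | ⟨k, hk, rfl⟩)
    · exact ⟨k, hmax la (by simp) k hk, 0, by simp, by simpa using hk,
        by simp only [List.getElem_cons_zero];
           rw [List.getElem?_eq_getElem hk]; push_cast; simp⟩
    · exact ⟨k, hmax lb (by simp) k hk, 1, by simp, by simpa using hk,
        by simp only [List.getElem_cons_zero, List.getElem_cons_succ];
           rw [List.getElem?_eq_getElem hk]; push_cast; simp⟩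
    · exact ⟨k, hmax lc (by simp) k hk, 2, by simp, by simpa using hk,
        by simp only [List.getElem_cons_zero, List.getElem_cons_succ];
           rw [List.getElem?_eq_getElem hk]; push_cast; simp⟩
    · exact ⟨k, hmax ld (by simp) k hk, 3, by simp, by simpa using hk,
        by simp only [List.getElem_cons_zero, List.getElem_cons_succ];
           rw [List.getElem?_eq_getElem hk]; push_cast; simp⟩

theorem pvPairwise_pvSeg (l : List String) (p : Int) :
    (pvSeg l p).Pairwise (fun a b => a.1 < b.1) := by
  rw [pvSeg, List.pairwise_map]
  exact (PySem.List.pairwise_lt_enumerate l 0).imp (fun h => by dsimp only; omega)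

theorem pvKey_pvSeg (l : List String) (p : Int) (x : Int × String) (hx : x ∈ pvSeg l p) :
    ∃ k : Nat, x.1 = 4 * k + p := by
  obtain ⟨k, _, rfl⟩ := (pvMem_pvSeg _ _ _).mp hx
  exact ⟨k, rfl⟩

theorem pvNodup_pvSeg (l : List String) (p : Int) : (pvSeg l p).Nodup :=
  (pvPairwise_pvSeg l p).imp (fun h => by intro he; rw [he] at h; omega)

theorem pvNe_pvSeg (l l' : List String) (p p' : Int) (hp : 0 ≤ p) (hp4 : p < 4)
    (hp' : 0 ≤ p') (hp4' : p' < 4) (hne : p ≠ p') :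
    ∀ a ∈ pvSeg l p, ∀ b ∈ pvSeg l' p', a ≠ b := by
  intro a ha b hb he
  obtain ⟨k, hk⟩ := pvKey_pvSeg _ _ _ ha
  obtain ⟨k', hk'⟩ := pvKey_pvSeg _ _ _ hb
  rw [he] at hk
  rw [hk'] at hk
  omega

theorem pvNodup_col (la lb lc ld : List String) :
    (pvSeg la 0 ++ pvSeg lb 1 ++ pvSeg lc 2 ++ pvSeg ld 3).Nodup := by
  rw [List.nodup_append, List.nodup_append, List.nodup_append]
  refine ⟨⟨⟨pvNodup_pvSeg la 0, pvNodup_pvSeg lb 1, ?_⟩, pvNodup_pvSeg lc 2, ?_⟩,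
    pvNodup_pvSeg ld 3, ?_⟩
  · intro a ha b hb
    exact pvNe_pvSeg la lb 0 1 (by norm_num) (by norm_num) (by norm_num) (by norm_num)
      (by norm_num) a ha b hb
  · intro a ha b hb
    rcases List.mem_append.mp ha with ha | ha
    · exact pvNe_pvSeg la lc 0 2 (by norm_num) (by norm_num) (by norm_num) (by norm_num)
        (by norm_num) a ha b hb
    · exact pvNe_pvSeg lb lc 1 2 (by norm_num) (by norm_num) (by norm_num) (by norm_num)
        (by norm_num) a ha b hb
  · intro a ha b hb
    rcases List.mem_append.mp ha with ha | ha
    · rcases List.mem_append.mp ha with ha | ha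
      · exact pvNe_pvSeg la ld 0 3 (by norm_num) (by norm_num) (by norm_num) (by norm_num)
          (by norm_num) a ha b hb
      · exact pvNe_pvSeg lb ld 1 3 (by norm_num) (by norm_num) (by norm_num) (by norm_num)
          (by norm_num) a ha b hb
    · exact pvNe_pvSeg lc ld 2 3 (by norm_num) (by norm_num) (by norm_num) (by norm_num)
        (by norm_num) a ha b hb

theorem pvPerm (la lb lc ld : List String) :
    (pvYs [la, lb, lc, ld]).Perm (pvSeg la 0 ++ pvSeg lb 1 ++ pvSeg lc 2 ++ pvSeg ld 3) := by
  refine List.perm_of_nodup_nodup_toFinset_eq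
    ((pvPairwise_pvYs [la, lb, lc, ld] (by simp)).imp
      (fun h => by intro he; rw [he] at h; omega))
    (pvNodup_col la lb lc ld) ?_
  ext x
  simp only [List.mem_toFinset]
  exact pvMem_pvYs la lb lc ld x

theorem pvMap_snd_pvYs (lists : List (List String)) :
    (pvYs lists).map (fun t => t.2) = pvTail lists 0 := by
  rw [pvYs, pvTail, List.map_flatMap, Nat.sub_zero, ← List.range_eq_range']
  exact List.flatMap_congr (fun r _ => pvMap_snd_pvDec lists 0 r)

theorem pvMaster (la lb lc ld : List String) (tagged : List (Int × String))
    (hperm : tagged.Perm (pvSeg la 0 ++ pvSeg lb 1 ++ pvSeg lc 2 ++ pvSeg ld 3)) :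
    (PySem.List.sorted tagged (fun t => t.1) false).map (fun t => t.2) = pvTail [la, lb, lc, ld] 0 := by
  have hs : PySem.List.sorted tagged (fun t => t.1) false = pvYs [la, lb, lc, ld] :=
    PySem.List.sorted_eq_of_perm_of_pairwise_lt tagged (pvYs [la, lb, lc, ld]) (fun t => t.1)
      ((pvPerm la lb lc ld).trans hperm.symm)
      (pvPairwise_pvYs [la, lb, lc, ld] (by simp))
  rw [hs, pvMap_snd_pvYs]

-- ===== VERDICT (by name: the statement is the Claim_ definition above) =====
theorem organize_bids_in_rotation_spec : Claim_equal_organize_bids_in_rotation := by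
  intro bdd c _ hpre
  unfold Spec_organize_bids_in_rotation
  unfold Pre_organize_bids_in_rotation at hpre
  simp only [List.mem_cons, List.not_mem_nil, or_false] at hpre
  rcases hpre with h | h | h | h
  · simp only [organize_bids_in_rotation, organize_bids_in_rotation_alt, h]
    refine (pvA_eq_tail bdd ["North", "East", "South", "West"] (by decide) (by decide)).trans
      (pvMaster _ _ _ _ _ ?_).symm
    simp only [PySem.List.enumerate_cons, PySem.List.enumerate_nil, List.foldl_cons,
      List.foldl_nil, PySem.List.foldl_append_singleton_eq_map]
    have e0 : PySem.Int.mod (0 - (↑((PySem.List.index? ["North", "East", "South", "West"] "North").getD 0) : Int)) 4 = 0 := by decide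
    have e1 : PySem.Int.mod (0 + 1 - (↑((PySem.List.index? ["North", "East", "South", "West"] "North").getD 0) : Int)) 4 = 1 := by decide
    have e2 : PySem.Int.mod (0 + 1 + 1 - (↑((PySem.List.index? ["North", "East", "South", "West"] "North").getD 0) : Int)) 4 = 2 := by decide
    have e3 : PySem.Int.mod (0 + 1 + 1 + 1 - (↑((PySem.List.index? ["North", "East", "South", "West"] "North").getD 0) : Int)) 4 = 3 := by decide
    simp only [e0, e1, e2, e3, List.nil_append, pvSeg, List.append_assoc]
    exact List.Perm.refl _
  · simp only [organize_bids_in_rotation, organize_bids_in_rotation_alt, h]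
    refine (pvA_eq_tail bdd ["East", "South", "West", "North"] (by decide) (by decide)).trans
      (pvMaster _ _ _ _ _ ?_).symm
    simp only [PySem.List.enumerate_cons, PySem.List.enumerate_nil, List.foldl_cons,
      List.foldl_nil, PySem.List.foldl_append_singleton_eq_map]
    have e0 : PySem.Int.mod (0 - (↑((PySem.List.index? ["North", "East", "South", "West"] "East").getD 0) : Int)) 4 = 3 := by decide
    have e1 : PySem.Int.mod (0 + 1 - (↑((PySem.List.index? ["North", "East", "South", "West"] "East").getD 0) : Int)) 4 = 0 := by decide
    have e2 : PySem.Int.mod (0 + 1 + 1 - (↑((PySem.List.index? ["North", "East", "South", "West"] "East").getD 0) : Int)) 4 = 1 := by decide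
    have e3 : PySem.Int.mod (0 + 1 + 1 + 1 - (↑((PySem.List.index? ["North", "East", "South", "West"] "East").getD 0) : Int)) 4 = 2 := by decide
    simp only [e0, e1, e2, e3, List.nil_append]
    simpa [pvSeg, List.append_assoc] using List.perm_append_comm (l₁ := pvSeg ((PySem.Dict.mk bdd).getD "North" []) 3) (l₂ := pvSeg ((PySem.Dict.mk bdd).getD "East" []) 0 ++ pvSeg ((PySem.Dict.mk bdd).getD "South" []) 1 ++ pvSeg ((PySem.Dict.mk bdd).getD "West" []) 2)
  · simp only [organize_bids_in_rotation, organize_bids_in_rotation_alt, h]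
    refine (pvA_eq_tail bdd ["South", "West", "North", "East"] (by decide) (by decide)).trans
      (pvMaster _ _ _ _ _ ?_).symm
    simp only [PySem.List.enumerate_cons, PySem.List.enumerate_nil, List.foldl_cons,
      List.foldl_nil, PySem.List.foldl_append_singleton_eq_map]
    have e0 : PySem.Int.mod (0 - (↑((PySem.List.index? ["North", "East", "South", "West"] "South").getD 0) : Int)) 4 = 2 := by decide
    have e1 : PySem.Int.mod (0 + 1 - (↑((PySem.List.index? ["North", "East", "South", "West"] "South").getD 0) : Int)) 4 = 3 := by decide
    have e2 : PySem.Int.mod (0 + 1 + 1 - (↑((PySem.List.index? ["North", "East", "South", "West"] "South").getD 0) : Int)) 4 = 0 := by decide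
    have e3 : PySem.Int.mod (0 + 1 + 1 + 1 - (↑((PySem.List.index? ["North", "East", "South", "West"] "South").getD 0) : Int)) 4 = 1 := by decide
    simp only [e0, e1, e2, e3, List.nil_append]
    simpa [pvSeg, List.append_assoc] using List.perm_append_comm (l₁ := pvSeg ((PySem.Dict.mk bdd).getD "North" []) 2 ++ pvSeg ((PySem.Dict.mk bdd).getD "East" []) 3) (l₂ := pvSeg ((PySem.Dict.mk bdd).getD "South" []) 0 ++ pvSeg ((PySem.Dict.mk bdd).getD "West" []) 1)
  · simp only [organize_bids_in_rotation, organize_bids_in_rotation_alt, h]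
    refine (pvA_eq_tail bdd ["West", "North", "East", "South"] (by decide) (by decide)).trans
      (pvMaster _ _ _ _ _ ?_).symm
    simp only [PySem.List.enumerate_cons, PySem.List.enumerate_nil, List.foldl_cons,
      List.foldl_nil, PySem.List.foldl_append_singleton_eq_map]
    have e0 : PySem.Int.mod (0 - (↑((PySem.List.index? ["North", "East", "South", "West"] "West").getD 0) : Int)) 4 = 1 := by decide
    have e1 : PySem.Int.mod (0 + 1 - (↑((PySem.List.index? ["North", "East", "South", "West"] "West").getD 0) : Int)) 4 = 2 := by decide
    have e2 : PySem.Int.mod (0 + 1 + 1 - (↑((PySem.List.index? ["North", "East", "South", "West"] "West").getD 0) : Int)) 4 = 3 := by decide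
    have e3 : PySem.Int.mod (0 + 1 + 1 + 1 - (↑((PySem.List.index? ["North", "East", "South", "West"] "West").getD 0) : Int)) 4 = 0 := by decide
    simp only [e0, e1, e2, e3, List.nil_append]
    simpa [pvSeg, List.append_assoc] using List.perm_append_comm (l₁ := pvSeg ((PySem.Dict.mk bdd).getD "North" []) 1 ++ pvSeg ((PySem.Dict.mk bdd).getD "East" []) 2 ++ pvSeg ((PySem.Dict.mk bdd).getD "South" []) 3) (l₂ := pvSeg ((PySem.Dict.mk bdd).getD "West" []) 0)
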